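-- pv_equiv track=rewrite | github.com/ngominhchau24/practice_synthesis | lab1/truth_table.py | build_outputs_from_minterm_indices
-- ===== SOURCE A (Python) =====
-- import itertools
-- from typing import Dict, List, Optional, Set, Tuple
-- from typing import Tuple
--
-- def gen_all_input_combinations(n_inputs: int) -> List[str]:
--     if n_inputs < 1:
--         raise ValueError("n_inputs must be >= 1")
--     return [''.join(bits) for bits in itertools.product('01', repeat=n_inputs)]
--
-- def build_outputs_from_minterm_indices(
--     n_inputs: int,
--     outputs_spec: Dict[str, Tuple[Set[int], Set[int]]],  # name -> (on_set, dc_set)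
-- ) -> Tuple[List[str], List[str], List[str]]:
--     """
--     Returns:
--       - inputs_bits: 2^N strings of N bits
--       - outputs_trits: 2^N strings of M chars where each char in {'0','1','-'}
--       - output_names: ordered list of output function names
--     '-' denotes don't care (used like 1 during grouping only).
--     """
--     inputs_bits = gen_all_input_combinations(n_inputs)
--     max_index = (1 << n_inputs) - 1
--     out_names = sorted(outputs_spec.keys())
--
--     # validate indices and overlap
--     for name, (on_set, dc_set) in outputs_spec.items():
--         bad_on = [i for i in on_set if i < 0 or i > max_index]
--         bad_dc = [i for i in dc_set if i < 0 or i > max_index]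
--         if bad_on:
--             raise ValueError(f"Output '{name}' has invalid ON indices: {bad_on} (N={n_inputs})")
--         if bad_dc:
--             raise ValueError(f"Output '{name}' has invalid DC indices: {bad_dc} (N={n_inputs})")
--         if (on_set & dc_set):
--             raise ValueError(f"Output '{name}' has overlap between ON and DC: {sorted(on_set & dc_set)}")
--
--     M = len(out_names)
--     rows: List[str] = []
--     for i in range(1 << n_inputs):
--         chars = []
--         for name in out_names:
--             on_set, dc_set = outputs_spec[name]
--             if i in on_set:
--                 chars.append('1')
--             elif i in dc_set:
--                 chars.append('-')
--             else:
--                 chars.append('0')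
--         rows.append(''.join(chars))
--     return inputs_bits, rows, out_names
-- ===== SOURCE B (Python) =====
-- import itertools
-- from typing import Dict, List, Set, Tuple
--
--
-- def gen_all_input_combinations(n_inputs: int) -> List[str]:
--     if n_inputs < 1:
--         raise ValueError("n_inputs must be >= 1")
--     return [''.join(bits) for bits in itertools.product('01', repeat=n_inputs)]
--
--
-- def build_outputs_from_minterm_indices(
--     n_inputs: int,
--     outputs_spec: Dict[str, Tuple[Set[int], Set[int]]],
-- ) -> Tuple[List[str], List[str], List[str]]:
--     inputs_bits = gen_all_input_combinations(n_inputs)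
--     max_index = (1 << n_inputs) - 1
--     out_names = sorted(outputs_spec.keys())
--
--     # validation (same checks and messages as the original, in the same order)
--     for name, (on_set, dc_set) in outputs_spec.items():
--         bad_on = [i for i in on_set if i < 0 or i > max_index]
--         bad_dc = [i for i in dc_set if i < 0 or i > max_index]
--         if bad_on:
--             raise ValueError(f"Output '{name}' has invalid ON indices: {bad_on} (N={n_inputs})")
--         if bad_dc:
--             raise ValueError(f"Output '{name}' has invalid DC indices: {bad_dc} (N={n_inputs})")
--         if (on_set & dc_set):
--             raise ValueError(f"Output '{name}' has overlap between ON and DC: {sorted(on_set & dc_set)}")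
--
--     # column-wise scatter instead of the row x name gather
--     size = 1 << n_inputs
--     columns = []
--     for name in out_names:
--         on_set, dc_set = outputs_spec[name]
--         col = ['0'] * size
--         for i in on_set:
--             col[i] = '1'
--         for i in dc_set:
--             col[i] = '-'
--         columns.append(col)
--     rows = [''.join(col[i] for col in columns) for i in range(size)]
--     return inputs_bits, rows, out_names
-- ===== Notes on version B (the rewrite author's own statement) =====
-- stated objective: alternative
-- what changed: Replaces A's row-by-row gather (a set-membership test for every (row, name) table cell) with one scattered column per output name (write '1'/'-' at the ON/DC indices of a '0'-filled column) followed by a transpose into rows; validation is kept unchanged.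
import Mathlib
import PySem

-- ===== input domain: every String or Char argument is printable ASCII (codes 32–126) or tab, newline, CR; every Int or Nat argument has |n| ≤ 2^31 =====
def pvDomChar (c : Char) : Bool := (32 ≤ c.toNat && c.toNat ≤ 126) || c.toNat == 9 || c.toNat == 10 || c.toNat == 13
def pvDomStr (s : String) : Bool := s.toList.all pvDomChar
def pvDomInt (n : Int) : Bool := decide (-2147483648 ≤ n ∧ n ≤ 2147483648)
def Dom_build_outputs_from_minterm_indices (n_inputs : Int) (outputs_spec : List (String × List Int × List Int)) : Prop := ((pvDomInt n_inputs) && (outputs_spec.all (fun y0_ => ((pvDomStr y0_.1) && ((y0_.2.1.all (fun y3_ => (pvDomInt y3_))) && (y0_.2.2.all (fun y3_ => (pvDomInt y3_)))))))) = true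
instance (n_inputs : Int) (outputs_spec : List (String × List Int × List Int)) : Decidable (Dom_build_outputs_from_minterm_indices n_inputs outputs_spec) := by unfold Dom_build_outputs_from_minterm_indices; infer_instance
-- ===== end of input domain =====

-- B replaces the row×name gather (a membership test per table cell) by one scattered column per
-- output name followed by a transpose; return value only, validation raises are outside Pre_.

-- ===== PORT A =====
-- itertools.product('01', repeat=n) joined to strings (shared helper gen_all_input_combinations,
-- identical in Source A and Source B; its n_inputs<1 ValueError is excluded by Pre_)
def pvCombos : Nat → List (List Char)
  | 0 => [[]]
  | n+1 => ['0','1'].flatMap (fun c => (pvCombos n).map (fun p => c :: p))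

-- dict lookup outputs_spec[name] (first match; keys of a Python dict are unique — see Pre_);
-- the default arm is unreachable: every looked-up name comes from the dict's own keys
def pvLookup (outputs_spec : List (String × List Int × List Int)) (name : String) : List Int × List Int :=
  match outputs_spec.find? (fun e => e.1 == name) with
  | some e => e.2
  | none => ([], [])

-- The validation loop only raises (excluded by Pre_) and contributes nothing to the return value.
def build_outputs_from_minterm_indices (n_inputs : Int) (outputs_spec : List (String × List Int × List Int)) : List String × List String × List String :=
  let inputs_bits := (pvCombos n_inputs.toNat).map String.mk
  let out_names := PySem.List.sorted (outputs_spec.map (·.1)) (fun x => x) false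
  let rows := (List.range (2 ^ n_inputs.toNat)).map (fun (i : Nat) =>
    String.mk (out_names.map (fun name =>
      let e := pvLookup outputs_spec name
      if (i : Int) ∈ e.1 then '1' else if (i : Int) ∈ e.2 then '-' else '0')))
  (inputs_bits, rows, out_names)

-- ===== PORT B =====
def build_outputs_from_minterm_indices_alt (n_inputs : Int) (outputs_spec : List (String × List Int × List Int)) : List String × List String × List String :=
  let inputs_bits := (pvCombos n_inputs.toNat).map String.mk
  let size := 2 ^ n_inputs.toNat
  let out_names := PySem.List.sorted (outputs_spec.map (·.1)) (fun x => x) false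
  let columns := out_names.map (fun name =>
    let e := pvLookup outputs_spec name
    let col := e.1.foldl (fun c i => PySem.List.pySetD c i '1') (List.replicate size '0')
    e.2.foldl (fun c i => PySem.List.pySetD c i '-') col)
  let rows := (List.range size).map (fun (i : Nat) =>
    String.mk (columns.map (fun col => col.getD i '?')))  -- col[i], i always in range
  (inputs_bits, rows, out_names)

-- ===== PRECONDITION & SPEC =====
-- Pre_ excludes exactly the inputs where A raises ValueError (n_inputs < 1, an ON/DC index out of
-- [0, 2^n-1], or ON∩DC nonempty); the Nodup clause is representational only: a Python dict cannot
-- have duplicate keys, so such association lists encode no input A is ever called on.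
def Pre_build_outputs_from_minterm_indices (n_inputs : Int) (outputs_spec : List (String × List Int × List Int)) : Prop :=
  1 ≤ n_inputs ∧ (outputs_spec.map (·.1)).Nodup ∧
  ∀ e ∈ outputs_spec,
    (∀ i ∈ e.2.1, 0 ≤ i ∧ i < (2 ^ n_inputs.toNat : Int)) ∧
    (∀ i ∈ e.2.2, 0 ≤ i ∧ i < (2 ^ n_inputs.toNat : Int)) ∧
    (∀ i ∈ e.2.1, i ∉ e.2.2)
instance (n_inputs : Int) (outputs_spec : List (String × List Int × List Int)) : Decidable (Pre_build_outputs_from_minterm_indices n_inputs outputs_spec) := by unfold Pre_build_outputs_from_minterm_indices; infer_instance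

def pvWitness_build_outputs_from_minterm_indices : Int × (List (String × List Int × List Int)) :=
  (2, [("g", ([0, 3], [1])), ("f", ([2], []))])

def Spec_build_outputs_from_minterm_indices (n_inputs : Int) (outputs_spec : List (String × List Int × List Int)) (out : List String × List String × List String) : Prop := out = build_outputs_from_minterm_indices_alt n_inputs outputs_spec
instance (n_inputs : Int) (outputs_spec : List (String × List Int × List Int)) (out : List String × List String × List String) : Decidable (Spec_build_outputs_from_minterm_indices n_inputs outputs_spec out) := by unfold Spec_build_outputs_from_minterm_indices; infer_instance

-- ===== CLAIM (what is proved, stated in full; the proofs are below) =====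
def Claim_equal_build_outputs_from_minterm_indices : Prop := ∀ (n_inputs : Int) (outputs_spec : List (String × List Int × List Int)), Dom_build_outputs_from_minterm_indices n_inputs outputs_spec → Pre_build_outputs_from_minterm_indices n_inputs outputs_spec → Spec_build_outputs_from_minterm_indices n_inputs outputs_spec (build_outputs_from_minterm_indices n_inputs outputs_spec)

-- ===== LEMMAS AND PROOFS =====

theorem pv_length_foldl_set (idxs : List Int) (c : List Char) (v : Char) :
    (idxs.foldl (fun c i => PySem.List.pySetD c i v) c).length = c.length := by
  induction idxs generalizing c with
  | nil => rfl
  | cons a t ih => simp [List.foldl_cons, ih, PySem.List.length_pySetD]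

theorem pv_getD_foldl_set (idxs : List Int) (c : List Char) (v d : Char) (j : Nat)
    (hnn : ∀ i ∈ idxs, 0 ≤ i) :
    (idxs.foldl (fun c i => PySem.List.pySetD c i v) c).getD j d
      = if (j : Int) ∈ idxs then (if j < c.length then v else d) else c.getD j d := by
  induction idxs generalizing c with
  | nil => simp
  | cons a t ih =>
    have ha : 0 ≤ a := hnn a (List.mem_cons_self ..)
    rw [List.foldl_cons, PySem.List.pySetD_of_nonneg _ _ ha,
        ih _ (fun i hi => hnn i (List.mem_cons_of_mem _ hi)), List.length_set]
    have hgd : (c.set a.toNat v).getD j d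
        = if a.toNat = j ∧ j < c.length then v else c.getD j d := by
      rcases eq_or_ne a.toNat j with h | h
      · subst h
        by_cases hlen : a.toNat < c.length
        · simp [List.getD, hlen]
        · simp [List.getD, hlen]
      · simp [List.getD, List.getElem?_set, h]  -- h : a.toNat ≠ j
    by_cases hjt : (j : Int) ∈ t
    · simp [hjt]
    · rw [if_neg hjt, hgd]
      by_cases hja : a = (j : Int)
      · have hat : a.toNat = j := by omega
        by_cases hlen : j < c.length
        · simp [List.mem_cons, hja, hlen]
        · simp [List.mem_cons, hja, hat, hlen, List.getD,
            List.getElem?_eq_none (by omega : c.length ≤ j)]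
      · have h1 : ¬ (a.toNat = j ∧ j < c.length) := by
          intro h; omega
        have h2 : (j : Int) ∉ a :: t := by
          simp only [List.mem_cons]
          push Not
          exact ⟨fun h => hja h.symm, hjt⟩
        rw [if_neg h1, if_neg h2]

-- the scattered column agrees pointwise with A's gathered cell
theorem pv_col_getD (on dc : List Int) (size j : Nat) (hj : j < size)
    (hon : ∀ i ∈ on, 0 ≤ i) (hdc : ∀ i ∈ dc, 0 ≤ i)
    (hdisj : ∀ i ∈ on, i ∉ dc) :
    ((dc.foldl (fun c i => PySem.List.pySetD c i '-')
        (on.foldl (fun c i => PySem.List.pySetD c i '1') (List.replicate size '0'))).getD j '?')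
      = (if (j : Int) ∈ on then '1' else if (j : Int) ∈ dc then '-' else '0') := by
  have hlen : (on.foldl (fun c i => PySem.List.pySetD c i '1') (List.replicate size '0')).length = size := by
    rw [pv_length_foldl_set]; simp
  rw [pv_getD_foldl_set _ _ _ _ _ hdc, hlen]
  by_cases hjd : (j : Int) ∈ dc
  · have : (j : Int) ∉ on := fun h => hdisj _ h hjd
    simp [hjd, hj, this]
  · rw [pv_getD_foldl_set _ _ _ _ _ hon]
    simp [hjd, hj, List.getD_replicate]

theorem pv_lookup_spec (outputs_spec : List (String × List Int × List Int)) (name : String)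
    (h : name ∈ outputs_spec.map (·.1)) :
    ∃ e ∈ outputs_spec, pvLookup outputs_spec name = e.2 := by
  obtain ⟨e, he, hname⟩ := List.mem_map.mp h
  have hsome : (outputs_spec.find? (fun e => e.1 == name)).isSome := by
    apply List.find?_isSome.mpr
    exact ⟨e, he, by simp [hname]⟩
  obtain ⟨e', he'⟩ := Option.isSome_iff_exists.mp hsome
  exact ⟨e', List.mem_of_find?_eq_some he', by simp [pvLookup, he']⟩

-- ===== VERDICT (by name: the statement is the Claim_ definition above) =====
theorem build_outputs_from_minterm_indices_spec : Claim_equal_build_outputs_from_minterm_indices := by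
  intro n_inputs outputs_spec _hdom hpre
  obtain ⟨-, -, hval⟩ := hpre
  unfold Spec_build_outputs_from_minterm_indices
  simp only [build_outputs_from_minterm_indices, build_outputs_from_minterm_indices_alt]
  refine Prod.ext rfl (Prod.ext ?_ rfl)
  simp only [List.map_map]
  apply List.map_congr_left
  intro i hi
  have hi' : i < 2 ^ n_inputs.toNat := List.mem_range.mp hi
  congr 1
  apply List.map_congr_left
  intro name hname
  have hname' : name ∈ outputs_spec.map (·.1) := (PySem.List.mem_sorted _ _ _ _).mp hname
  obtain ⟨e, he, hlk⟩ := pv_lookup_spec outputs_spec name hname'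
  obtain ⟨hon, hdc, hdisj⟩ := hval e he
  simp only [Function.comp_apply, hlk]
  exact (pv_col_getD e.2.1 e.2.2 _ i hi'
    (fun i h => (hon i h).1) (fun i h => (hdc i h).1) hdisj).symm
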